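-- pv_equiv track=rewrite | github.com/S0okJu/BOJ | Gold/2000-2999/2300-2399/2374/2374.py | solution
-- ===== SOURCE A (Python) =====
-- from typing import List
--
-- def solution(N:int, A: List[int])->int:
--     result = 0
--     stack = []
--     target = 0
--
--     for a in A:
--         target = max(target, a)
--
--         if stack:
--             top = stack[-1]
--             if top < a:
--                 result +=(a-stack.pop())
--             else:
--                 stack.pop()
--
--
--         stack.append(a)
--
--     while stack:
--         result += (target-stack.pop())
--
--     return result
-- ===== SOURCE B (Python) =====
-- def solution(N, A):
--     # Signed-coefficient formulation: each element contributes v * w where the weight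
--     # w in {-1, 0, 1} is determined by comparing v with its neighbours; no differences,
--     # no stack. The sequence is extended by max(0, max(A)) so the last element is
--     # weighted like every other.
--     if not A:
--         return 0
--     ext = A + [max(0, max(A))]
--     total = 0
--     for p, v, n in zip([None] + ext, ext, ext[1:] + [None]):
--         w = int(p is not None and p < v) - int(n is not None and v < n)
--         total += v * w
--     return total
-- ===== Notes on version B (the rewrite author's own statement) =====
-- stated objective: alternative
-- what changed: Replaced A's stack with pops and difference accumulation by a signed-coefficient sum: extend the list with max(0, max(A)) and add each element times a {-1,0,1} weight determined by comparing it with its two neighbours (no stack, no consecutive differences computed).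
import Mathlib
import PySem

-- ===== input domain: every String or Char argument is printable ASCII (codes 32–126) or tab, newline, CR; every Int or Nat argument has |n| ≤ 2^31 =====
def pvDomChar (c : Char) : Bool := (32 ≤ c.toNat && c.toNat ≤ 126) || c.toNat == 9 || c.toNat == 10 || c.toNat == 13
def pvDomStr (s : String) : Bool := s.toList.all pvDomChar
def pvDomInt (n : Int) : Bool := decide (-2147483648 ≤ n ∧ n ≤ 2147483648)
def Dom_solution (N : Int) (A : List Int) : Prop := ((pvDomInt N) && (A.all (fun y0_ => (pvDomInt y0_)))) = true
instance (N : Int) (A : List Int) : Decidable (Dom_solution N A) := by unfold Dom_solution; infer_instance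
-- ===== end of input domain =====

-- B drops A's stack and its difference accumulation entirely: it weights each element of
-- A ++ [max(0, max A)] by a {-1,0,1} coefficient from neighbour comparisons and sums v*w.

-- ===== PORT A =====
-- one loop step of A's `for a in A`: state = (result, stack, target)
def solutionStep (st : Int × List Int × Int) (a : Int) : Int × List Int × Int :=
  let (result, stack, target) := st
  let target := max target a
  match stack.getLast? with
  | some top =>
      let stack := stack.dropLast            -- stack.pop()
      let result := if top < a then result + (a - top) else result
      (result, stack ++ [a], target)
  | none => (result, stack ++ [a], target)

-- A's `while stack: result += target - stack.pop()`, processing the popped elements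
-- top-first (applied to stack.reverse)
def solutionDrain (target : Int) : List Int → Int → Int
  | [], result => result
  | x :: rest, result => solutionDrain target rest (result + (target - x))

def solution (N : Int) (A : List Int) : Int :=
  let st := A.foldl solutionStep (0, ([] : List Int), 0)
  solutionDrain st.2.2 st.2.1.reverse st.1

-- ===== PORT B =====
-- `p is not None and p < v`
def pvUp (p : Option Int) (v : Int) : Bool := match p with | some q => q < v | none => false
-- `n is not None and v < n`
def pvDown (v : Int) (n : Option Int) : Bool := match n with | some w => v < w | none => false

-- one body of B's `for p, v, n in zip(...)` loop
def solutionAltStep (total : Int) (pvn : Option Int × Int × Option Int) : Int :=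
  let (p, v, n) := pvn
  let w : Int := (if pvUp p v then 1 else 0) - (if pvDown v n then 1 else 0)
  total + v * w

def solution_alt (N : Int) (A : List Int) : Int :=
  match A with
  | [] => 0
  | h :: t =>
      let ext := (h :: t) ++ [max 0 (t.foldl max h)]        -- A + [max(0, max(A))]
      let triples := List.zipWith3 (fun p v n => (p, v, n))
        ((none : Option Int) :: ext.map some) ext ((ext.drop 1).map some ++ [none])
      triples.foldl solutionAltStep 0

-- ===== PRECONDITION & SPEC =====
def Spec_solution (N : Int) (A : List Int) (out : Int) : Prop := out = solution_alt N A
instance (N : Int) (A : List Int) (out : Int) : Decidable (Spec_solution N A out) := by unfold Spec_solution; infer_instance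

-- ===== CLAIM (what is proved, stated in full; the proofs are below) =====
def Claim_equal_solution : Prop := ∀ (N : Int) (A : List Int), Dom_solution N A → Spec_solution N A (solution N A)

-- ===== LEMMAS AND PROOFS =====

-- total ascent of a list: sum of positive consecutive differences (proof-side notion)
def pvAsc : List Int → Int
  | [] => 0
  | [_] => 0
  | x :: y :: rest => max 0 (y - x) + pvAsc (y :: rest)

-- after the first iteration, A's stack always holds exactly the previous element
theorem solution_loop (l : List Int) (x result target : Int) :
    l.foldl solutionStep (result, [x], target) =
      (result + pvAsc (x :: l), [l.getLastD x], l.foldl max target) := by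
  induction l generalizing x result target with
  | nil => simp [List.foldl, pvAsc]
  | cons a rest ih =>
      simp only [List.foldl_cons, solutionStep, List.getLast?_singleton]
      simp only [List.dropLast, List.nil_append]
      rw [ih]
      simp only [List.getLastD_cons, pvAsc]
      have hx : (if x < a then result + (a - x) else result) = result + max 0 (a - x) := by
        by_cases h : x < a <;> simp [h] <;> omega
      rw [hx, add_assoc]

-- B's zip3 loop: closed form by one induction, generalising the previous element p
theorem solution_alt_loop (rest : List Int) (v : Int) (p : Option Int) (acc : Int) :
    (List.zipWith3 (fun p v n => (p, v, n)) (p :: (v :: rest).map some) (v :: rest)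
        (rest.map some ++ [none])).foldl solutionAltStep acc =
      acc + pvAsc (v :: rest) + (if pvUp p v then v else 0) := by
  induction rest generalizing v p acc with
  | nil =>
      simp only [List.map, List.nil_append, List.zipWith3, List.foldl, solutionAltStep,
        pvAsc, pvDown]
      by_cases h : pvUp p v = true <;> simp [h]
  | cons w r ih =>
      simp only [List.map, List.cons_append, List.zipWith3, List.foldl]
      have hih := ih w (some v) (solutionAltStep acc (p, v, some w))
      simp only [List.map] at hih
      rw [hih]
      simp only [solutionAltStep]
      have e1 : pvDown v (some w) = decide (v < w) := rfl
      have e2 : pvUp (some v) w = decide (v < w) := rfl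
      rw [e1, e2]
      simp only [pvAsc]
      by_cases hq : pvUp p v = true <;> by_cases hvw : v < w <;>
        simp [hq, hvw] <;> omega

theorem pvAsc_append_last (l : List Int) (x m : Int) :
    pvAsc ((x :: l) ++ [m]) = pvAsc (x :: l) + max 0 (m - l.getLastD x) := by
  induction l generalizing x with
  | nil => simp [pvAsc]
  | cons y r ih =>
      simp only [List.cons_append, pvAsc, List.getLastD_cons] at *
      rw [ih]
      ring

theorem foldl_max_init_le (l : List Int) (x y : Int) (h : x ≤ y) :
    l.foldl max x ≤ l.foldl max y := by
  induction l generalizing x y with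
  | nil => simpa
  | cons a r ih => exact ih _ _ (max_le_max h le_rfl)

theorem getLastD_le_foldl_max (l : List Int) (x : Int) :
    l.getLastD x ≤ l.foldl max x := by
  induction l generalizing x with
  | nil => simp
  | cons y r ih =>
      simp only [List.getLastD_cons, List.foldl_cons]
      exact (ih y).trans (foldl_max_init_le r y (max x y) (le_max_right x y))

theorem foldl_max_zero (t : List Int) (h : Int) :
    t.foldl max (max 0 h) = max 0 (t.foldl max h) := by
  induction t generalizing h with
  | nil => rfl
  | cons a rest ih => simp only [List.foldl_cons, max_assoc]; exact ih (max h a)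

-- ===== VERDICT (by name: the statement is the Claim_ definition above) =====
theorem solution_spec : Claim_equal_solution := by
  intro N A _
  unfold Spec_solution
  cases A with
  | nil => rfl
  | cons h t =>
      show solution N (h :: t) = solution_alt N (h :: t)
      unfold solution solution_alt
      rw [List.foldl_cons]
      have h1 : solutionStep (0, ([] : List Int), 0) h = (0, [h], max 0 h) := by
        simp [solutionStep]
      rw [h1, solution_loop]
      have h2 := solution_alt_loop (t ++ [max 0 (t.foldl max h)]) h none 0
      simp only [List.cons_append, List.drop_succ_cons, List.drop_zero] at h2 ⊢
      rw [h2]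
      have h5 : pvAsc (h :: (t ++ [max 0 (t.foldl max h)]))
          = pvAsc (h :: t) + max 0 (max 0 (t.foldl max h) - t.getLastD h) := by
        rw [← List.cons_append, pvAsc_append_last]
      rw [h5]
      have h6 : (if pvUp none h then h else (0:Int)) = 0 := rfl
      rw [h6]
      simp only [List.reverse_singleton, solutionDrain, foldl_max_zero]
      have h4 : t.getLastD h ≤ max 0 (t.foldl max h) :=
        le_trans (getLastD_le_foldl_max t h) (le_max_right _ _)
      omega
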